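-- pv_equiv track=rewrite | github.com/CoderKn1ght/-CTCI-Python | CH1_Arrays_and_Strings/leetcode/q680_leetcode_valid_palindrome_2.py | faster_approach
-- ===== SOURCE A (Python) =====
-- def faster_approach(s):
--     start = 0
--     end = len(s) - 1
--
--     while start < end:
--         if s[start] is not s[end]:
--             return search(start + 1, end, s) or search(start, end - 1, s)
--         start += 1
--         end -= 1
--
--     return True
--
-- def search(start, end, s):
--     if start >= end:
--         return True
--     if s[start] is not s[end]:
--         return False
--
--     return search(start + 1, end - 1,s)
-- ===== SOURCE B (Python) =====
-- def faster_approach(s):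
--     i, j = 0, len(s) - 1
--     while i < j and s[i] == s[j]:
--         i += 1
--         j -= 1
--     if i >= j:
--         return True
--     a = s[i + 1:j + 1]
--     b = s[i:j]
--     return a == a[::-1] or b == b[::-1]
-- ===== Notes on version B (the rewrite author's own statement) =====
-- stated objective: idiomatic
-- what changed: Replaced the recursive search helper by an iterative scan to the first mismatch followed by checking the two candidate substrings with a slice-equals-its-reverse test.
import Mathlib
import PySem

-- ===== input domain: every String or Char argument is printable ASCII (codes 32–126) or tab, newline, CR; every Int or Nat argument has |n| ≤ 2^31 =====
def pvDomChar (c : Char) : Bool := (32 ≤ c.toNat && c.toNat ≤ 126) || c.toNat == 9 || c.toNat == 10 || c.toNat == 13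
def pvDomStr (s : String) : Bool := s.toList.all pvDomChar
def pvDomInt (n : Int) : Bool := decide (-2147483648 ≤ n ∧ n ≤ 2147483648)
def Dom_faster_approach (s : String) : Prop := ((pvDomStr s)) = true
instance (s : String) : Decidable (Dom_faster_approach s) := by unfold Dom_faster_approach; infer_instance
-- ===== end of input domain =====

-- B replaces A's recursive `search` helper by an iterative scan to the first mismatch plus
-- a slice-equals-its-reverse palindrome test (objective: idiomatic; same O(n) cost).
-- On the ASCII domain `is not` on single characters coincides with `!=` (CPython interning).

-- ===== PORT A =====
-- helper `search` of A; indices reachable from `faster_approach` are always in range,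
-- so the Option comparison of pyGet? is exactly Python's char comparison.
def searchA (start e : Int) (l : List Char) : Bool :=
  if _h : start ≥ e then true
  else if PySem.List.pyGet? l start ≠ PySem.List.pyGet? l e then false
  else searchA (start + 1) (e - 1) l
termination_by (e - start).toNat
decreasing_by omega

def loopA (start e : Int) (l : List Char) : Bool :=
  if _h : start < e then
    if PySem.List.pyGet? l start ≠ PySem.List.pyGet? l e then
      searchA (start + 1) e l || searchA start (e - 1) l
    else loopA (start + 1) (e - 1) l
  else true
termination_by (e - start).toNat
decreasing_by omega

def faster_approach (s : String) : Bool :=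
  loopA 0 ((s.toList.length : Int) - 1) s.toList

-- ===== PORT B =====
-- B's `while i < j and s[i] == s[j]` loop
def bLoop (i j : Int) (l : List Char) : Int × Int :=
  if _h : i < j ∧ PySem.List.pyGet? l i = PySem.List.pyGet? l j then
    bLoop (i + 1) (j - 1) l
  else (i, j)
termination_by (j - i).toNat
decreasing_by omega

def faster_approach_alt (s : String) : Bool :=
  let l := s.toList
  let p := bLoop 0 ((l.length : Int) - 1) l
  if p.1 ≥ p.2 then true
  else
    let a := PySem.List.slice l (some (p.1 + 1)) (some (p.2 + 1))
    let b := PySem.List.slice l (some p.1) (some p.2)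
    (a == a.reverse) || (b == b.reverse)

-- ===== PRECONDITION & SPEC =====
def Spec_faster_approach (s : String) (out : Bool) : Prop := out = faster_approach_alt s
instance (s : String) (out : Bool) : Decidable (Spec_faster_approach s out) := by unfold Spec_faster_approach; infer_instance

-- ===== CLAIM (what is proved, stated in full; the proofs are below) =====
def Claim_equal_faster_approach : Prop := ∀ (s : String), Dom_faster_approach s → Spec_faster_approach s (faster_approach s)

-- ===== LEMMAS AND PROOFS =====

theorem palShort {x : List Char} (h : x.length ≤ 1) : (x == x.reverse) = true := by
  match x, h with
  | [], _ => rfl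
  | [a], _ => simp

theorem palCons (c d : Char) (m : List Char) :
    ((c :: (m ++ [d])) == (c :: (m ++ [d])).reverse) = (decide (c = d) && (m == m.reverse)) := by
  rw [Bool.eq_iff_iff]
  simp only [Bool.and_eq_true, beq_iff_eq, decide_eq_true_eq,
    List.reverse_cons, List.reverse_append, List.reverse_nil,
    List.nil_append, List.cons_append, List.cons.injEq]
  constructor
  · rintro ⟨rfl, h⟩
    have := (List.append_inj' h rfl).1
    exact ⟨rfl, this⟩
  · rintro ⟨rfl, h⟩
    exact ⟨rfl, by rw [← h]⟩

theorem sliceDecomp (l : List Char) (i j : Nat) (hij : i < j) (hj : j < l.length) :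
    PySem.List.slice l (some (i:Int)) (some ((j:Int)+1)) =
      l[i] :: (PySem.List.slice l (some ((i:Int)+1)) (some (j:Int)) ++ [l[j]]) := by
  have h1 : ((j:Int)+1) = ((j+1 : Nat) : Int) := by push_cast; ring
  have h2 : ((i:Int)+1) = ((i+1 : Nat) : Int) := by push_cast; ring
  rw [h1, h2, PySem.List.slice_natCast, PySem.List.slice_natCast]
  have hi : i < l.length := lt_trans hij hj
  rw [List.drop_eq_getElem_cons hi]
  have : j + 1 - i = (j - i) + 1 := by omega
  rw [this, List.take_succ_cons]
  have : j - i = (j - (i+1)) + 1 := by omega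
  rw [this, List.take_add_one]
  congr 1
  have : (l.drop (i+1))[j - (i+1)]? = some l[j] := by
    rw [List.getElem?_drop]
    have : i + 1 + (j - (i+1)) = j := by omega
    rw [this, List.getElem?_eq_getElem hj]
  rw [this]
  rfl

theorem clampStep (n : Nat) (p q : Int) (h : q ≤ p) (hq : -1 ≤ q) (hp : 0 ≤ p) :
    PySem.List.clampIdx n (q+1) ≤ PySem.List.clampIdx n p + 1 := by
  simp only [PySem.List.clampIdx, Nat.min_def]
  split_ifs <;> omega

theorem search_eq_pal (l : List Char) (p q : Int) (hp : 0 ≤ p) (hq : q < (l.length : Int)) (hq1 : -1 ≤ q) :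
    searchA p q l =
      ((PySem.List.slice l (some p) (some (q + 1))) ==
        (PySem.List.slice l (some p) (some (q + 1))).reverse) := by
  rw [searchA]
  by_cases hpq : p ≥ q
  · rw [dif_pos hpq]
    refine (palShort ?_).symm
    rw [PySem.List.length_slice]
    have := clampStep l.length p q hpq hq1 hp
    omega
  · rw [dif_neg hpq]
    have hp' : p = ((p.toNat : Nat) : Int) := (Int.toNat_of_nonneg hp).symm
    have hq' : q = ((q.toNat : Nat) : Int) := (Int.toNat_of_nonneg (by omega)).symm
    have hij : p.toNat < q.toNat := by omega
    have hjlen : q.toNat < l.length := by omega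
    rw [hp', hq', PySem.List.pyGet?_natCast, PySem.List.pyGet?_natCast,
      List.getElem?_eq_getElem (lt_trans hij hjlen), List.getElem?_eq_getElem hjlen]
    rw [sliceDecomp l p.toNat q.toNat hij hjlen, palCons]
    by_cases hcd : l[p.toNat] = l[q.toNat]
    · rw [if_neg (by simp [hcd]), decide_eq_true hcd, Bool.true_and]
      have e1 : ((p.toNat : Int)) + 1 = (p + 1) := by omega
      have e0 : ((q.toNat : Int)) - 1 = q - 1 := by omega
      have e2 : ((q.toNat : Int)) = (q - 1) + 1 := by omega
      rw [e1, e0, e2]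
      exact search_eq_pal l (p+1) (q-1) (by omega) (by omega) (by omega)
    · rw [if_pos (by simp [hcd]), decide_eq_false hcd, Bool.false_and]
termination_by (q - p).toNat
decreasing_by omega

theorem loop_eq' (l : List Char) (st en : Int) (hst : 0 ≤ st) (hen : en < (l.length : Int)) :
    loopA st en l =
      (let p := bLoop st en l
       if p.1 ≥ p.2 then true
       else
         let a := PySem.List.slice l (some (p.1 + 1)) (some (p.2 + 1))
         let b := PySem.List.slice l (some p.1) (some p.2)
         (a == a.reverse) || (b == b.reverse)) := by
  rw [loopA, bLoop]
  by_cases h : st < en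
  · by_cases heq : PySem.List.pyGet? l st = PySem.List.pyGet? l en
    · rw [dif_pos h, if_neg (by simp [heq]), dif_pos ⟨h, heq⟩]
      exact loop_eq' l (st+1) (en-1) (by omega) (by omega)
    · rw [dif_pos h, if_pos (by simp [heq]), dif_neg (by simp [heq])]
      simp only [not_le.mpr h]
      congr 1
      · rw [search_eq_pal l (st+1) en (by omega) hen (by omega)]
      · have : en = (en - 1) + 1 := by omega
        rw [search_eq_pal l st (en-1) hst (by omega) (by omega), ← this]
  · rw [dif_neg h, dif_neg (by tauto)]
    simp only [ge_iff_le]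
    rw [if_pos (by omega)]
termination_by (en - st).toNat
decreasing_by omega

-- ===== VERDICT (by name: the statement is the Claim_ definition above) =====
theorem faster_approach_spec : Claim_equal_faster_approach := by
  intro s _
  unfold Spec_faster_approach faster_approach faster_approach_alt
  exact loop_eq' s.toList 0 ((s.toList.length : Int) - 1) le_rfl (by omega)
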